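-- pv_equiv track=rewrite | github.com/itsme-shawn/algorithmmmmm | programmers/10000_99999/42891/42891.py | solution
-- ===== SOURCE A (Python) =====
-- def solution(food_times, k):
--     answer = 0
--     length = len(food_times)
--     sec = 0
--     flag = 0
--
--     while True:
--         for i in range(length):
--             if max(food_times) == 0:  # 먹방을 할 수 없는 경우에는 while문 break
--                 answer = -1
--                 flag = 1
--                 break
--             elif food_times[i] > 0:  # 먹방 가능한 경우
--                 if sec == k:  # 탈출
--                     answer = i + 1
--                     flag = 1
--                     break
--                 else:  # 먹방하고 시간증가
--                     food_times[i] -= 1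
--                     sec += 1
--         if flag == 1:
--             break
--
--     return answer
-- ===== SOURCE B (Python) =====
-- def solution(food_times, k):
--     # Batch whole round-robin rounds instead of simulating second by second.
--     # Return value only: unlike A, this does not mutate food_times.
--     if k < 0 or k >= sum(t for t in food_times if t > 0):
--         return -1
--     foods = food_times
--     while True:
--         alive = [i for i, t in enumerate(foods) if t > 0]
--         if k < len(alive):
--             return alive[k] + 1
--         k -= len(alive)
--         foods = [t - 1 if t > 0 else t for t in foods]
-- ===== Notes on version B (the rewrite author's own statement) =====
-- stated objective: faster
-- what changed: A simulates eating second by second, rescanning the whole list with max() before every single bite; B first returns -1 by comparing k with the total edible amount and otherwise batches one whole round-robin round at a time (one list scan per round instead of one per second), without mutating the input list.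
import Mathlib
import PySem

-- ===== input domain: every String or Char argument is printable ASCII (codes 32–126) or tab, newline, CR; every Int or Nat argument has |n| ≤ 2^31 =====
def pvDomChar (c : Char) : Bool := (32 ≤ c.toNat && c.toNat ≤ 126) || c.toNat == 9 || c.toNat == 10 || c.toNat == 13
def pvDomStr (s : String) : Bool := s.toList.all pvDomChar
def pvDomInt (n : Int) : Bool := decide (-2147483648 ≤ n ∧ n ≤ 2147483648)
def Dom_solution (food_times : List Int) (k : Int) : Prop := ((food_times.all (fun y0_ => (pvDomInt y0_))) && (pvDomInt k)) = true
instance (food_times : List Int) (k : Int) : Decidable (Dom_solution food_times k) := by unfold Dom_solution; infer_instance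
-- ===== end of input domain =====

-- B replaces A's per-second simulation (with a max() scan every second) by whole-round batching
-- plus an up-front -1 test; equivalence is about the RETURN value only (A mutates food_times, B does not).

-- ===== PORT A =====
-- outcome of one run of the inner `for i in range(length)` loop: either the loop set
-- `flag = 1` with `answer = a` (ans a), or it ran to completion (cont foods sec)
inductive PassOut where
  | ans : Int → PassOut
  | cont : List Int → Int → PassOut
deriving Repr, DecidableEq

-- the inner `for i in range(length)` loop of A, state = (food_times, sec)
def passA (k : Int) (l : List Int) (sec : Int) (i : Nat) : PassOut :=
  if h : i < l.length then
    if PySem.List.max? l (fun y => y) = some 0 then .ans (-1)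
    else if 0 < l[i] then
      if sec = k then .ans ((i : Int) + 1)
      else passA k (l.set i (l[i] - 1)) (sec + 1) (i + 1)
    else passA k l sec (i + 1)
  else .cont l sec
termination_by l.length - i
decreasing_by
  · simp only [List.length_set]; omega
  · omega

-- the outer `while True` loop of A; the fuel is only a termination guard (on Pre_ the loop
-- terminates and the fuel chosen in `solution` is always enough — proved in the lemmas)
def runA (k : Int) : Nat → List Int → Int → Int
  | 0, _, _ => -1
  | fuel + 1, l, sec =>
    match passA k l sec 0 with
    | .ans a => a
    | .cont l' sec' => runA k fuel l' sec'

def solution (food_times : List Int) (k : Int) : Int :=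
  runA k ((food_times.map Int.toNat).sum + 2) food_times 0

-- ===== PORT B =====
-- sum(t for t in food_times if t > 0)
def posTotal (l : List Int) : Int := (l.filter (fun t => 0 < t)).sum

-- [i for i, t in enumerate(foods) if t > 0]
def aliveB (l : List Int) : List Int :=
  ((PySem.List.enumerate l).filter (fun p => 0 < p.2)).map (fun p => p.1)

-- the `while True` loop of B; fuel k+1 is always enough (each round shrinks k by ≥ 1)
def runB : Nat → List Int → Int → Int
  | 0, _, _ => -1
  | fuel + 1, l, k =>
    let alive := aliveB l
    if k < (alive.length : Int) then (PySem.List.pyGet? alive k).getD 0 + 1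
    else runB fuel (l.map (fun t => if 0 < t then t - 1 else t)) (k - (alive.length : Int))

def solution_alt (food_times : List Int) (k : Int) : Int :=
  if k < 0 ∨ posTotal food_times ≤ k then -1
  else runB (k.toNat + 1) food_times k

-- ===== PRECONDITION & SPEC =====
-- Pre_ excludes exactly the inputs on which A never returns: the empty list (the `for` body
-- never runs and the `while True` loop spins forever) and lists whose entries are all negative
-- (nothing is edible and `max(food_times) == 0` never holds, so the loop spins forever).
def Pre_solution (food_times : List Int) (k : Int) : Prop :=
  food_times ≠ [] ∧ ∃ x ∈ food_times, 0 ≤ x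
instance (food_times : List Int) (k : Int) : Decidable (Pre_solution food_times k) := by
  unfold Pre_solution; infer_instance

def pvWitness_solution : List Int × Int := ([3, 1, 2], 5)

def Spec_solution (food_times : List Int) (k : Int) (out : Int) : Prop := out = solution_alt food_times k
instance (food_times : List Int) (k : Int) (out : Int) : Decidable (Spec_solution food_times k out) := by unfold Spec_solution; infer_instance

-- ===== CLAIM (what is proved, stated in full; the proofs are below) =====
def Claim_equal_solution : Prop := ∀ (food_times : List Int) (k : Int), Dom_solution food_times k → Pre_solution food_times k → Spec_solution food_times k (solution food_times k)

-- ===== LEMMAS AND PROOFS =====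

-- decrement applied to one plate by a full round
def decPos (t : Int) : Int := if 0 < t then t - 1 else t

-- one full round applied to the plate list
def decAll (l : List Int) : List Int := l.map decPos

lemma decAll_eq (l : List Int) : l.map (fun t => if 0 < t then t - 1 else t) = decAll l := rfl

-- positions (from offset ofs) of the still-positive plates
def aliveAux (ofs : Nat) : List Int → List Nat
  | [] => []
  | t :: ts => if 0 < t then ofs :: aliveAux (ofs + 1) ts else aliveAux (ofs + 1) ts

lemma length_aliveAux (l : List Int) : ∀ ofs, (aliveAux ofs l).length = (l.filter (fun t => 0 < t)).length := by
  induction l with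
  | nil => intro ofs; simp [aliveAux]
  | cons t ts ih =>
    intro ofs
    by_cases h : 0 < t <;> simp [aliveAux, h, ih]

lemma exists_pos_of_aliveAux (l : List Int) : ∀ ofs, aliveAux ofs l ≠ [] → ∃ x ∈ l, 0 < x := by
  induction l with
  | nil => intro ofs h; simp [aliveAux] at h
  | cons t ts ih =>
    intro ofs h
    by_cases ht : 0 < t
    · exact ⟨t, List.mem_cons_self, ht⟩
    · simp only [aliveAux, if_neg ht] at h
      obtain ⟨x, hx, hx0⟩ := ih (ofs + 1) h
      exact ⟨x, List.mem_cons_of_mem _ hx, hx0⟩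

lemma decPos_pos (y : Int) (h : 0 < decPos y) : 0 < y := by
  by_cases hy : 0 < y
  · exact hy
  · simp only [decPos, if_neg hy] at h; exact h

lemma exists_pos_of_decAll (l : List Int) (h : ∃ x ∈ decAll l, 0 < x) : ∃ x ∈ l, 0 < x := by
  obtain ⟨x, hx, hx0⟩ := h
  obtain ⟨y, hy, rfl⟩ := List.mem_map.mp hx
  exact ⟨y, hy, decPos_pos y hx0⟩

lemma max_ne_zero_of_pos (l : List Int) (h : ∃ x ∈ l, 0 < x) :
    PySem.List.max? l (fun y => y) ≠ some 0 := by
  intro hmax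
  obtain ⟨x, hx, hx0⟩ := h
  have := PySem.List.max?_isMax hmax x hx
  simp at this
  omega

lemma max_eq_zero (l : List Int) (hne : l ≠ []) (hall : ∀ x ∈ l, x ≤ 0) (hex : ∃ x ∈ l, 0 ≤ x) :
    PySem.List.max? l (fun y => y) = some 0 := by
  obtain ⟨m, hm⟩ : ∃ m, PySem.List.max? l (fun y => y) = some m := by
    cases hmm : PySem.List.max? l (fun y => y) with
    | none => exact absurd ((PySem.List.max?_eq_none_iff _ _).mp hmm) hne
    | some m => exact ⟨m, rfl⟩
  have hmem : m ∈ l := PySem.List.max?_mem hm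
  obtain ⟨x, hx, hx0⟩ := hex
  have hxm := PySem.List.max?_isMax hm x hx
  simp at hxm
  have : m = 0 := le_antisymm (hall m hmem) (le_trans hx0 hxm)
  rw [hm, this]

lemma pass_hit (k : Int) : ∀ (rest pre : List Int) (sec : Int),
    sec ≤ k → k < sec + ((aliveAux pre.length rest).length : Int) →
    passA k (pre ++ rest) sec pre.length =
      .ans (((aliveAux pre.length rest).getD (k - sec).toNat 0 : Int) + 1) := by
  intro rest
  induction rest with
  | nil => intro pre sec h1 h2; simp [aliveAux] at h2; omega
  | cons t ts ih =>
    intro pre sec h1 h2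
    have hlen : pre.length < (pre ++ t :: ts).length := by simp
    have hget : (pre ++ t :: ts)[pre.length] = t := by
      rw [List.getElem_append_right (le_refl _)]; simp
    have hne : aliveAux pre.length (t :: ts) ≠ [] := by
      intro hc
      rw [hc] at h2
      simp at h2
      omega
    have hmax : PySem.List.max? (pre ++ t :: ts) (fun y => y) ≠ some 0 := by
      apply max_ne_zero_of_pos
      obtain ⟨x, hx, hx0⟩ := exists_pos_of_aliveAux (t :: ts) pre.length hne
      exact ⟨x, List.mem_append_right _ hx, hx0⟩
    rw [passA, dif_pos hlen, if_neg hmax]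
    simp only [hget]
    by_cases ht : 0 < t
    · rw [if_pos ht]
      have haux : aliveAux pre.length (t :: ts) = pre.length :: aliveAux (pre.length + 1) ts := by
        simp [aliveAux, ht]
      by_cases hsk : sec = k
      · rw [if_pos hsk]
        subst hsk
        simp [haux]
      · rw [if_neg hsk]
        have hset : (pre ++ t :: ts).set pre.length (t - 1) = (pre ++ [t - 1]) ++ ts := by
          rw [List.set_append]
          simp
        rw [hset]
        have hlen' : (pre ++ [t - 1]).length = pre.length + 1 := by simp
        have h2' : k < (sec + 1) + ((aliveAux (pre.length + 1) ts).length : Int) := by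
          rw [haux] at h2; simp at h2; omega
        have := ih (pre ++ [t - 1]) (sec + 1) (by omega) (by rw [hlen']; exact h2')
        rw [hlen'] at this
        rw [this]
        have hpos : 0 < (k - sec).toNat := by omega
        have htn : (k - sec).toNat = (k - (sec + 1)).toNat + 1 := by omega
        rw [haux, htn]
        simp
    · rw [if_neg ht]
      have haux : aliveAux pre.length (t :: ts) = aliveAux (pre.length + 1) ts := by
        simp [aliveAux, ht]
      have happ : pre ++ t :: ts = (pre ++ [t]) ++ ts := by simp
      have hlen' : (pre ++ [t]).length = pre.length + 1 := by simp
      rw [happ]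
      have h2' : k < sec + ((aliveAux (pre.length + 1) ts).length : Int) := by rw [haux] at h2; exact h2
      have := ih (pre ++ [t]) sec h1 (by rw [hlen']; exact h2')
      rw [hlen'] at this
      rw [this, haux]

lemma pass_cont (k : Int) : ∀ (rest pre : List Int) (sec : Int),
    ¬(sec ≤ k ∧ k < sec + ((aliveAux pre.length rest).length : Int)) →
    (∃ x ∈ pre ++ decAll rest, 0 < x) →
    passA k (pre ++ rest) sec pre.length =
      .cont (pre ++ decAll rest) (sec + ((aliveAux pre.length rest).length : Int)) := by
  intro rest
  induction rest with
  | nil =>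
    intro pre sec hout hpos
    rw [passA]
    rw [dif_neg (by simp)]
    simp [aliveAux, decAll]
  | cons t ts ih =>
    intro pre sec hout hpos
    have hlen : pre.length < (pre ++ t :: ts).length := by simp
    have hget : (pre ++ t :: ts)[pre.length] = t := by
      rw [List.getElem_append_right (le_refl _)]; simp
    have hmax : PySem.List.max? (pre ++ t :: ts) (fun y => y) ≠ some 0 := by
      apply max_ne_zero_of_pos
      obtain ⟨x, hx, hx0⟩ := hpos
      rcases List.mem_append.mp hx with hxp | hxd
      · exact ⟨x, List.mem_append_left _ hxp, hx0⟩
      · obtain ⟨y, hy, hx0'⟩ := exists_pos_of_decAll (t :: ts) ⟨x, hxd, hx0⟩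
        exact ⟨y, List.mem_append_right _ hy, hx0'⟩
    rw [passA, dif_pos hlen, if_neg hmax]
    simp only [hget]
    by_cases ht : 0 < t
    · rw [if_pos ht]
      have haux : aliveAux pre.length (t :: ts) = pre.length :: aliveAux (pre.length + 1) ts := by
        simp [aliveAux, ht]
      have hdec : decAll (t :: ts) = (t - 1) :: decAll ts := by simp [decAll, decPos, ht]
      have hsk : sec ≠ k := by
        intro hc
        apply hout
        rw [haux]
        constructor
        · omega
        · simp; omega
      rw [if_neg hsk]
      have hset : (pre ++ t :: ts).set pre.length (t - 1) = (pre ++ [t - 1]) ++ ts := by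
        rw [List.set_append]; simp
      rw [hset]
      have hlen' : (pre ++ [t - 1]).length = pre.length + 1 := by simp
      have hout' : ¬(sec + 1 ≤ k ∧ k < (sec + 1) + ((aliveAux (pre.length + 1) ts).length : Int)) := by
        rw [haux] at hout
        simp only [List.length_cons] at hout
        push_neg at hout ⊢
        intro hk1
        by_cases hsek : sec ≤ k
        · have := hout hsek
          push_cast at this ⊢
          omega
        · omega
      have hpos' : ∃ x ∈ (pre ++ [t - 1]) ++ decAll ts, 0 < x := by
        rw [hdec] at hpos
        simpa using hpos
      have := ih (pre ++ [t - 1]) (sec + 1) (by rw [hlen']; exact hout') hpos'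
      rw [hlen'] at this
      rw [this, haux, hdec]
      congr 1
      · simp
      · simp only [List.length_cons]; push_cast; ring
    · rw [if_neg ht]
      have haux : aliveAux pre.length (t :: ts) = aliveAux (pre.length + 1) ts := by
        simp [aliveAux, ht]
      have hdec : decAll (t :: ts) = t :: decAll ts := by simp [decAll, decPos, ht]
      have happ : pre ++ t :: ts = (pre ++ [t]) ++ ts := by simp
      have hlen' : (pre ++ [t]).length = pre.length + 1 := by simp
      rw [happ]
      have hout' : ¬(sec ≤ k ∧ k < sec + ((aliveAux (pre.length + 1) ts).length : Int)) := by
        rw [haux] at hout; exact hout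
      have hpos' : ∃ x ∈ (pre ++ [t]) ++ decAll ts, 0 < x := by
        rw [hdec] at hpos
        simpa using hpos
      have := ih (pre ++ [t]) sec (by rw [hlen']; exact hout') hpos'
      rw [hlen'] at this
      rw [this, haux, hdec]
      simp

lemma pass_dead (k : Int) : ∀ (rest pre : List Int) (sec : Int),
    ¬(sec ≤ k ∧ k < sec + ((aliveAux pre.length rest).length : Int)) →
    passA k (pre ++ rest) sec pre.length = .ans (-1) ∨
    passA k (pre ++ rest) sec pre.length =
      .cont (pre ++ decAll rest) (sec + ((aliveAux pre.length rest).length : Int)) := by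
  intro rest
  induction rest with
  | nil =>
    intro pre sec hout
    right
    rw [passA]
    rw [dif_neg (by simp)]
    simp [aliveAux, decAll]
  | cons t ts ih =>
    intro pre sec hout
    have hlen : pre.length < (pre ++ t :: ts).length := by simp
    have hget : (pre ++ t :: ts)[pre.length] = t := by
      rw [List.getElem_append_right (le_refl _)]; simp
    rw [passA, dif_pos hlen]
    by_cases hmax : PySem.List.max? (pre ++ t :: ts) (fun y => y) = some 0
    · left; rw [if_pos hmax]
    · rw [if_neg hmax]
      simp only [hget]
      by_cases ht : 0 < t
      · rw [if_pos ht]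
        have haux : aliveAux pre.length (t :: ts) = pre.length :: aliveAux (pre.length + 1) ts := by
          simp [aliveAux, ht]
        have hdec : decAll (t :: ts) = (t - 1) :: decAll ts := by simp [decAll, decPos, ht]
        have hsk : sec ≠ k := by
          intro hc
          apply hout
          rw [haux]
          exact ⟨by omega, by simp; omega⟩
        rw [if_neg hsk]
        have hset : (pre ++ t :: ts).set pre.length (t - 1) = (pre ++ [t - 1]) ++ ts := by
          rw [List.set_append]; simp
        rw [hset]
        have hlen' : (pre ++ [t - 1]).length = pre.length + 1 := by simp
        have hout' : ¬(sec + 1 ≤ k ∧ k < (sec + 1) + ((aliveAux (pre.length + 1) ts).length : Int)) := by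
          rw [haux] at hout
          simp only [List.length_cons] at hout
          push_neg at hout ⊢
          intro hk1
          by_cases hsek : sec ≤ k
          · have := hout hsek
            push_cast at this ⊢
            omega
          · omega
        rcases ih (pre ++ [t - 1]) (sec + 1) (by rw [hlen']; exact hout') with h | h
        · left; rw [hlen'] at h; exact h
        · right
          rw [hlen'] at h
          rw [h, haux, hdec]
          congr 1
          · simp
          · simp only [List.length_cons]; push_cast; ring
      · rw [if_neg ht]
        have haux : aliveAux pre.length (t :: ts) = aliveAux (pre.length + 1) ts := by
          simp [aliveAux, ht]
        have hdec : decAll (t :: ts) = t :: decAll ts := by simp [decAll, decPos, ht]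
        have happ : pre ++ t :: ts = (pre ++ [t]) ++ ts := by simp
        have hlen' : (pre ++ [t]).length = pre.length + 1 := by simp
        rw [happ]
        have hout' : ¬(sec ≤ k ∧ k < sec + ((aliveAux (pre.length + 1) ts).length : Int)) := by
          rw [haux] at hout; exact hout
        rcases ih (pre ++ [t]) sec (by rw [hlen']; exact hout') with h | h
        · left; rw [hlen'] at h; exact h
        · right
          rw [hlen'] at h
          rw [h, haux, hdec]
          simp

lemma pass_zero (k : Int) (l : List Int) (sec : Int) (hne : l ≠ [])
    (hall : ∀ x ∈ l, x ≤ 0) (hex : ∃ x ∈ l, 0 ≤ x) : passA k l sec 0 = .ans (-1) := by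
  rw [passA]
  rw [dif_pos (List.length_pos_iff.mpr hne)]
  rw [if_pos (max_eq_zero l hne hall hex)]

lemma posTotal_cons (t : Int) (ts : List Int) :
    posTotal (t :: ts) = (if 0 < t then t else 0) + posTotal ts := by
  by_cases h : 0 < t <;> simp [posTotal, List.filter_cons, h]

lemma posTotal_nonneg (l : List Int) : 0 ≤ posTotal l := by
  induction l with
  | nil => simp [posTotal]
  | cons t ts ih => rw [posTotal_cons]; split_ifs <;> omega

lemma length_le_posTotal (l : List Int) : ((l.filter (fun t => 0 < t)).length : Int) ≤ posTotal l := by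
  induction l with
  | nil => simp [posTotal]
  | cons t ts ih =>
    rw [posTotal_cons]
    by_cases h : 0 < t <;> simp [List.filter_cons, h] <;> push_cast <;> omega

lemma posTotal_decAll (l : List Int) :
    posTotal (decAll l) = posTotal l - ((l.filter (fun t => 0 < t)).length : Int) := by
  induction l with
  | nil => simp [posTotal, decAll]
  | cons t ts ih =>
    have hdec : decAll (t :: ts) = decPos t :: decAll ts := by simp [decAll]
    rw [hdec, posTotal_cons, posTotal_cons]
    by_cases h : 0 < t
    · simp only [decPos, if_pos h]
      by_cases h1 : 0 < t - 1 <;> simp [List.filter_cons, h, h1] <;> push_cast <;> omega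
    · simp only [decPos, if_neg h]
      simp [List.filter_cons, h, ih]

lemma all_nonpos_of_posTotal_zero (l : List Int) (h : posTotal l = 0) : ∀ x ∈ l, x ≤ 0 := by
  induction l with
  | nil => simp
  | cons t ts ih =>
    rw [posTotal_cons] at h
    have hts := posTotal_nonneg ts
    intro x hx
    rcases List.mem_cons.mp hx with rfl | hx'
    · split_ifs at h <;> omega
    · exact ih (by split_ifs at h <;> omega) x hx'

lemma exists_pos_of_posTotal_pos (l : List Int) (h : 0 < posTotal l) : ∃ x ∈ l, 0 < x := by
  induction l with
  | nil => simp [posTotal] at h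
  | cons t ts ih =>
    rw [posTotal_cons] at h
    by_cases ht : 0 < t
    · exact ⟨t, List.mem_cons_self, ht⟩
    · rw [if_neg ht] at h
      obtain ⟨x, hx, hx0⟩ := ih (by omega)
      exact ⟨x, List.mem_cons_of_mem _ hx, hx0⟩

lemma posTotal_toNat_le (l : List Int) : (posTotal l).toNat ≤ (l.map Int.toNat).sum := by
  induction l with
  | nil => simp [posTotal]
  | cons t ts ih =>
    rw [posTotal_cons]
    simp only [List.map_cons, List.sum_cons]
    have := posTotal_nonneg ts
    split_ifs <;> omega

lemma aliveB_aux (l : List Int) : ∀ s : Nat,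
    ((PySem.List.enumerate l (s : Int)).filter (fun p => 0 < p.2)).map (fun p => p.1) =
      (aliveAux s l).map (fun j : Nat => (j : Int)) := by
  induction l with
  | nil => intro s; simp [PySem.List.enumerate_nil, aliveAux]
  | cons t ts ih =>
    intro s
    rw [PySem.List.enumerate_cons]
    have hcast : ((s : Int) + 1) = ((s + 1 : Nat) : Int) := by push_cast; ring
    by_cases h : 0 < t
    · simp only [List.filter_cons, aliveAux, if_pos h]
      simp only [decide_eq_true_eq]
      rw [if_pos h]
      simp only [List.map_cons]
      rw [hcast, ih (s + 1)]
    · simp only [List.filter_cons, aliveAux, if_neg h]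
      simp only [decide_eq_true_eq]
      rw [if_neg h, hcast, ih (s + 1)]

lemma aliveB_eq (l : List Int) : aliveB l = (aliveAux 0 l).map (fun j : Nat => (j : Int)) := by
  have := aliveB_aux l 0
  simpa [aliveB] using this

lemma decAll_ne_nil (l : List Int) (h : l ≠ []) : decAll l ≠ [] := by
  simp [decAll]; exact h

lemma exists_nonneg_decAll (l : List Int) (h : ∃ x ∈ l, 0 ≤ x) : ∃ x ∈ decAll l, 0 ≤ x := by
  obtain ⟨x, hx, hx0⟩ := h
  refine ⟨decPos x, List.mem_map.mpr ⟨x, hx, rfl⟩, ?_⟩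
  simp [decPos]; split_ifs <;> omega

lemma runA_ans (k : Int) (f : Nat) (l : List Int) (sec a : Int)
    (h : passA k l sec 0 = .ans a) : runA k (f + 1) l sec = a := by
  simp [runA, h]

lemma runA_cont (k : Int) (f : Nat) (l : List Int) (sec : Int) (l' : List Int) (s' : Int)
    (h : passA k l sec 0 = .cont l' s') : runA k (f + 1) l sec = runA k f l' s' := by
  simp [runA, h]

lemma runA_spec (k : Int) : ∀ (fuel : Nat) (l : List Int) (sec : Int) (fuelB : Nat),
    l ≠ [] → (∃ x ∈ l, 0 ≤ x) → (posTotal l).toNat + 2 ≤ fuel → (k - sec).toNat + 1 ≤ fuelB →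
    runA k fuel l sec = if sec ≤ k ∧ k < sec + posTotal l then runB fuelB l (k - sec) else -1 := by
  intro fuel
  induction fuel using Nat.strong_induction_on with
  | _ fuel ihf =>
  intro l sec fuelB hne hex hfuel hfB
  obtain ⟨f, rfl⟩ : ∃ f, fuel = f + 1 := ⟨fuel - 1, by omega⟩
  have hmfilter := length_aliveAux l 0
  have hmle : (((aliveAux 0 l).length : Nat) : Int) ≤ posTotal l := by
    rw [hmfilter]; exact length_le_posTotal l
  have hTnn := posTotal_nonneg l
  by_cases hm : (aliveAux 0 l).length = 0
  · -- nothing edible: max == 0 at i = 0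
    have hfil : l.filter (fun t => 0 < t) = [] := by
      rw [← List.length_eq_zero_iff, ← hmfilter]; exact hm
    have hall : ∀ x ∈ l, x ≤ 0 := by
      intro x hx
      have := List.filter_eq_nil_iff.mp hfil x hx
      simp at this
      omega
    have hT0 : posTotal l = 0 := by simp [posTotal, hfil]
    rw [runA_ans k f l sec _ (pass_zero k l sec hne hall hex)]
    rw [if_neg (by omega)]
  · by_cases hhit : sec ≤ k ∧ k < sec + ((aliveAux 0 l).length : Int)
    · -- the k-th second falls inside this round
      have hp := pass_hit k l [] sec hhit.1 (by simpa using hhit.2)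
      simp only [List.nil_append, List.length_nil] at hp
      rw [runA_ans k f l sec _ hp]
      rw [if_pos ⟨hhit.1, by omega⟩]
      obtain ⟨fB, rfl⟩ : ∃ fB, fuelB = fB + 1 := ⟨fuelB - 1, by omega⟩
      have hlenB : ((aliveB l).length : Int) = ((aliveAux 0 l).length : Int) := by
        rw [aliveB_eq]; simp
      simp only [runB]
      rw [if_pos (by rw [hlenB]; omega)]
      have hj : (k - sec).toNat < (aliveAux 0 l).length := by omega
      have hcast : k - sec = (((k - sec).toNat : Nat) : Int) := by omega
      rw [aliveB_eq, hcast, PySem.List.pyGet?_natCast]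
      rw [List.getElem?_map, List.getElem?_eq_getElem hj]
      simp [List.getD_eq_getElem?_getD]
      rw [show ((max (k - sec) 0).toNat) = (k - sec).toNat from by omega]
      rw [List.getElem?_eq_getElem hj]
      simp
    · by_cases hgt : ((aliveAux 0 l).length : Int) < posTotal l
      · -- a full round passes, and something stays edible afterwards
        have hTdec : posTotal (decAll l) = posTotal l - ((aliveAux 0 l).length : Int) := by
          rw [posTotal_decAll, ← hmfilter]
        have hpos : ∃ x ∈ decAll l, 0 < x :=
          exists_pos_of_posTotal_pos _ (by omega)
        have hc := pass_cont k l [] sec (by simpa using hhit) (by simpa using hpos)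
        simp only [List.nil_append, List.length_nil] at hc
        rw [runA_cont k f l sec _ _ hc]
        have hne' := decAll_ne_nil l hne
        have hex' := exists_nonneg_decAll l hex
        have hfuel' : (posTotal (decAll l)).toNat + 2 ≤ f := by
          rw [hTdec]; omega
        by_cases hks : k < sec
        · rw [ihf f (by omega) (decAll l) (sec + ((aliveAux 0 l).length : Int)) 1 hne' hex' hfuel' (by omega)]
          rw [if_neg (by omega), if_neg (by omega)]
        · -- sec + m ≤ k
          have hkm : sec + ((aliveAux 0 l).length : Int) ≤ k := by
            rcases not_and_or.mp hhit with h | h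
            · omega
            · omega
          obtain ⟨fB, rfl⟩ : ∃ fB, fuelB = fB + 1 := ⟨fuelB - 1, by omega⟩
          have hfB' : (k - (sec + ((aliveAux 0 l).length : Int))).toNat + 1 ≤ fB := by omega
          rw [ihf f (by omega) (decAll l) (sec + ((aliveAux 0 l).length : Int)) fB hne' hex' hfuel' hfB']
          have hlenB : ((aliveB l).length : Int) = ((aliveAux 0 l).length : Int) := by
            rw [aliveB_eq]; simp
          by_cases hcond : sec ≤ k ∧ k < sec + posTotal l
          · rw [if_pos (by constructor <;> omega), if_pos hcond]
            simp only [runB]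
            rw [if_neg (by rw [hlenB]; omega)]
            rw [decAll_eq, hlenB]
            congr 1
            omega
          · rw [if_neg (by rw [hTdec] at *; omega), if_neg hcond]
      · -- a full round passes and empties every plate (all positives were exactly 1)
        have hTeq : posTotal l = ((aliveAux 0 l).length : Int) := le_antisymm (not_lt.mp hgt) hmle
        have hTdec : posTotal (decAll l) = 0 := by
          rw [posTotal_decAll, ← hmfilter]; omega
        rcases pass_dead k l [] sec (by simpa using hhit) with h | h
        · simp only [List.nil_append, List.length_nil] at h
          rw [runA_ans k f l sec _ h, if_neg (by rw [hTeq]; exact hhit)]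
        · simp only [List.nil_append, List.length_nil] at h
          obtain ⟨f', rfl⟩ : ∃ f', f = f' + 1 := ⟨f - 1, by omega⟩
          have hz := pass_zero k (decAll l) (sec + ((aliveAux 0 l).length : Int)) (decAll_ne_nil l hne)
            (all_nonpos_of_posTotal_zero _ hTdec) (exists_nonneg_decAll l hex)
          rw [runA_cont k (f' + 1) l sec _ _ h]
          rw [runA_ans k f' (decAll l) _ _ hz]
          rw [if_neg (by rw [hTeq]; exact hhit)]

-- ===== VERDICT (by name: the statement is the Claim_ definition above) =====
theorem solution_spec : Claim_equal_solution := by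
  intro ft k hdom hpre
  obtain ⟨hne, hex⟩ := hpre
  unfold Spec_solution solution solution_alt
  have hfA : (posTotal ft).toNat + 2 ≤ (ft.map Int.toNat).sum + 2 := by
    have := posTotal_toNat_le ft
    omega
  rw [runA_spec k _ ft 0 (k.toNat + 1) hne hex hfA (by omega)]
  have hTnn := posTotal_nonneg ft
  by_cases h : 0 ≤ k ∧ k < posTotal ft
  · rw [if_pos (by omega), if_neg (by omega)]
    congr 1
    omega
  · rw [if_neg (by omega), if_pos (by omega)]
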